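-- pv_equiv track=rewrite | github.com/mjXmsdgh/melody_generator | transformations.py | transform_rhythm_double_time
-- ===== SOURCE A (Python) =====
-- def transform_rhythm_double_time(motif_notes, key, scale, ticks_per_beat=480):
--     """
--     変換操作: 各音符を半分の長さの音符2つに分割する（倍速化）。
--     """
--     measure_data = []
--     current_time = 0
--
--     for pitch, duration in motif_notes:
--         half_duration = duration // 2
--         # 1つ目の8分音符
--         measure_data.append({'pitch': pitch, 'time': current_time, 'duration': half_duration})
--         current_time += half_duration
--         # 2つ目の8分音符
--         measure_data.append({'pitch': pitch, 'time': current_time, 'duration': half_duration})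
--         current_time += half_duration
--     return measure_data
-- ===== SOURCE B (Python) =====
-- def transform_rhythm_double_time(motif_notes, key, scale, ticks_per_beat=480):
--     """Split each note into two half-duration notes, using a precomputed
--     prefix-sum table of start times instead of a running clock."""
--     halves = [duration // 2 for _, duration in motif_notes]
--     starts = [0] * len(halves)
--     s = 0
--     for i, h in enumerate(halves):
--         starts[i] = s
--         s += 2 * h
--     return [note
--             for (pitch, _), h, t in zip(motif_notes, halves, starts)
--             for note in ({'pitch': pitch, 'time': t, 'duration': h},
--                          {'pitch': pitch, 'time': t + h, 'duration': h})]
-- ===== Notes on version B (the rewrite author's own statement) =====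
-- stated objective: alternative
-- what changed: B precomputes a list of half-durations and a prefix-sum table of start times, then emits both notes per entry from zip, instead of threading a mutable running current_time through the append loop.
import Mathlib
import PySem

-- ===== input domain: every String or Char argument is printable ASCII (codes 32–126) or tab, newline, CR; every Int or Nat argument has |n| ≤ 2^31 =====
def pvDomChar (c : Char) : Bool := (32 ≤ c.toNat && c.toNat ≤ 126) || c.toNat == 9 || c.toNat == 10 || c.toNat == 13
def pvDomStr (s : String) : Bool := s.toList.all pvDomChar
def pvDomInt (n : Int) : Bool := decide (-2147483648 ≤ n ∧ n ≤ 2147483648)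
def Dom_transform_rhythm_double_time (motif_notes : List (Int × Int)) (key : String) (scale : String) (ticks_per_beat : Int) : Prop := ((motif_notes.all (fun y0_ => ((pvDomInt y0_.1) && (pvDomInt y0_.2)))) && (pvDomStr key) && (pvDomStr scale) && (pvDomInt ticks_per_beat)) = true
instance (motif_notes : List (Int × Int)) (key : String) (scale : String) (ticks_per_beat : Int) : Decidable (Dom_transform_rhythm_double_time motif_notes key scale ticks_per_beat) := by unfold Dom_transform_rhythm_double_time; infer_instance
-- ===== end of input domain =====

-- ===== PORT A =====
-- B replaces A's running current_time accumulator by a precomputed prefix-sum table of start times (objective: alternative decomposition).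
def transform_rhythm_double_time (motif_notes : List (Int × Int)) (key : String) (scale : String) (ticks_per_beat : Int) : List (List (String × Int)) :=
  (motif_notes.foldl
    (fun (st : List (List (String × Int)) × Int) pd =>
      let half_duration := PySem.Int.floordiv pd.2 2
      let l1 := st.1 ++ [[("pitch", pd.1), ("time", st.2), ("duration", half_duration)]]
      let t1 := st.2 + half_duration
      let l2 := l1 ++ [[("pitch", pd.1), ("time", t1), ("duration", half_duration)]]
      (l2, t1 + half_duration))
    ([], 0)).1

-- ===== PORT B =====
def transform_rhythm_double_time_alt (motif_notes : List (Int × Int)) (key : String) (scale : String) (ticks_per_beat : Int) : List (List (String × Int)) :=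
  let halves := motif_notes.map (fun pd => PySem.Int.floordiv pd.2 2)
  let starts := (halves.foldl (fun (st : List Int × Int) h => (st.1 ++ [st.2], st.2 + 2 * h)) ([], 0)).1
  (motif_notes.zip (halves.zip starts)).flatMap
    (fun x =>
      [[("pitch", x.1.1), ("time", x.2.2), ("duration", x.2.1)],
       [("pitch", x.1.1), ("time", x.2.2 + x.2.1), ("duration", x.2.1)]])

-- ===== PRECONDITION & SPEC =====
def Spec_transform_rhythm_double_time (motif_notes : List (Int × Int)) (key : String) (scale : String) (ticks_per_beat : Int) (out : List (List (String × Int))) : Prop := out = transform_rhythm_double_time_alt motif_notes key scale ticks_per_beat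
instance (motif_notes : List (Int × Int)) (key : String) (scale : String) (ticks_per_beat : Int) (out : List (List (String × Int))) : Decidable (Spec_transform_rhythm_double_time motif_notes key scale ticks_per_beat out) := by unfold Spec_transform_rhythm_double_time; infer_instance

-- ===== CLAIM (what is proved, stated in full; the proofs are below) =====
def Claim_equal_transform_rhythm_double_time : Prop := ∀ (motif_notes : List (Int × Int)) (key : String) (scale : String) (ticks_per_beat : Int), Dom_transform_rhythm_double_time motif_notes key scale ticks_per_beat → Spec_transform_rhythm_double_time motif_notes key scale ticks_per_beat (transform_rhythm_double_time motif_notes key scale ticks_per_beat)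

-- ===== LEMMAS AND PROOFS =====

-- ===== VERDICT (by name: the statement is the Claim_ definition above) =====
-- emit: the common recursive description of the output stream starting at time t
def pvEmit : List (Int × Int) → Int → List (List (String × Int))
  | [], _ => []
  | pd :: rest, t =>
    let h := PySem.Int.floordiv pd.2 2
    [("pitch", pd.1), ("time", t), ("duration", h)] ::
    [("pitch", pd.1), ("time", t + h), ("duration", h)] ::
    pvEmit rest (t + 2 * h)

-- start times of the notes, beginning at time t
def pvStartsFrom : List Int → Int → List Int
  | [], _ => []
  | h :: hs, t => t :: pvStartsFrom hs (t + 2 * h)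

theorem pvFoldA_eq (mn : List (Int × Int)) (L : List (List (String × Int))) (t : Int) :
    (mn.foldl
      (fun (st : List (List (String × Int)) × Int) pd =>
        let half_duration := PySem.Int.floordiv pd.2 2
        let l1 := st.1 ++ [[("pitch", pd.1), ("time", st.2), ("duration", half_duration)]]
        let t1 := st.2 + half_duration
        let l2 := l1 ++ [[("pitch", pd.1), ("time", t1), ("duration", half_duration)]]
        (l2, t1 + half_duration))
      (L, t)).1 = L ++ pvEmit mn t := by
  induction mn generalizing L t with
  | nil => simp [pvEmit]
  | cons pd rest ih =>
      simp only [List.foldl_cons, pvEmit]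
      rw [ih]
      simp [List.append_assoc]
      ring_nf

theorem pvFoldStarts_eq (hs : List Int) (L : List Int) (t : Int) :
    (hs.foldl (fun (st : List Int × Int) h => (st.1 ++ [st.2], st.2 + 2 * h)) (L, t)).1
      = L ++ pvStartsFrom hs t := by
  induction hs generalizing L t with
  | nil => simp [pvStartsFrom]
  | cons h rest ih =>
      simp only [List.foldl_cons, pvStartsFrom]
      rw [ih]
      simp

theorem pvZip_eq (mn : List (Int × Int)) (t : Int) :
    (mn.zip ((mn.map (fun pd => PySem.Int.floordiv pd.2 2)).zip
        (pvStartsFrom (mn.map (fun pd => PySem.Int.floordiv pd.2 2)) t))).flatMap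
      (fun x =>
        [[("pitch", x.1.1), ("time", x.2.2), ("duration", x.2.1)],
         [("pitch", x.1.1), ("time", x.2.2 + x.2.1), ("duration", x.2.1)]])
      = pvEmit mn t := by
  induction mn generalizing t with
  | nil => simp [pvEmit]
  | cons pd rest ih =>
      simp only [List.map_cons, pvStartsFrom, List.zip_cons_cons, List.flatMap_cons, pvEmit]
      rw [ih]
      simp

theorem transform_rhythm_double_time_spec : Claim_equal_transform_rhythm_double_time := by
  intro mn key scale tpb _
  unfold Spec_transform_rhythm_double_time transform_rhythm_double_time transform_rhythm_double_time_alt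
  rw [pvFoldA_eq]
  dsimp only
  rw [pvFoldStarts_eq]
  simp only [List.nil_append]
  rw [pvZip_eq]
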